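-- pv_equiv track=rewrite | github.com/k-the-hidden-hero/bticino_intercom | custom_components/bticino_intercom/camera.py | _enable_audio_sendrecv
-- ===== SOURCE A (Python) =====
-- def _enable_audio_sendrecv(sdp: str) -> str:
--     """Change audio direction from recvonly to sendrecv in the outgoing SDP offer.
--
--     Applied to the browser's offer BEFORE sending to the BTicino device.
--     Only modifies the audio m-section; video stays recvonly.
--
--     Without this: device responds with sendonly but transmits no audio data.
--     With this: device sees sendrecv, enables audio transmission.
--     """
--     lines = sdp.split("\r\n")
--     result = []
--     in_audio = False
--     for line in lines:
--         if line.startswith("m=audio"):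
--             in_audio = True
--         elif line.startswith("m="):
--             in_audio = False
--
--         if in_audio and line == "a=recvonly":
--             result.append("a=sendrecv")
--         else:
--             result.append(line)
--     return "\r\n".join(result)
-- ===== SOURCE B (Python) =====
-- def _enable_audio_sendrecv(sdp: str) -> str:
--     # Group lines into m-sections, then rewrite only the audio sections.
--     lines = sdp.split("\r\n")
--     groups = []
--     cur = []
--     for line in lines:
--         if line.startswith("m="):
--             groups.append(cur)
--             cur = [line]
--         else:
--             cur.append(line)
--     groups.append(cur)
--     out = []
--     for g in groups:
--         if g and g[0].startswith("m=audio"):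
--             out.extend("a=sendrecv" if l == "a=recvonly" else l for l in g)
--         else:
--             out.extend(g)
--     return "\r\n".join(out)
-- ===== Notes on version B (the rewrite author's own statement) =====
-- stated objective: alternative
-- what changed: B splits the SDP into m-sections (a preamble group plus one group per m= line) and rewrites a=recvonly only inside groups headed by m=audio, instead of A's single pass with an in_audio boolean flag.
import Mathlib
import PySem

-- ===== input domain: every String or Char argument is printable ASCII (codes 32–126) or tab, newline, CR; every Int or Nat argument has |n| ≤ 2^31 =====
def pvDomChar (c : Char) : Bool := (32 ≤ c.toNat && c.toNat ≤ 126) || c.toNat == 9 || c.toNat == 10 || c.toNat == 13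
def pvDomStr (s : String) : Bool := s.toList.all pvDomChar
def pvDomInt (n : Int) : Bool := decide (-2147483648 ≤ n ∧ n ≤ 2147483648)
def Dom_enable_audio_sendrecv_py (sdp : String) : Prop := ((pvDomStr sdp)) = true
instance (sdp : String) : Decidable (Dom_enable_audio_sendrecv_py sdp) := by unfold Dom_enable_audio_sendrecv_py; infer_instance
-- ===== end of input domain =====

-- B rewrites a=recvonly→a=sendrecv by splitting the SDP into m-sections instead of A's in_audio flag; objective: alternative decomposition.

-- ===== PORT A =====
-- one fold over the lines carrying (result, in_audio), exactly A's loop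
def enable_audio_sendrecv_py (sdp : String) : String :=
  let lines := (PySem.Str.split? sdp "\r\n").getD []   -- sep is the non-empty literal "\r\n", so split? is always some
  let st := lines.foldl (fun (st : List String × Bool) line =>
    let inA := if PySem.Str.startswith line "m=audio" then true
               else if PySem.Str.startswith line "m=" then false
               else st.2
    if inA && line == "a=recvonly" then (st.1 ++ ["a=sendrecv"], inA)
    else (st.1 ++ [line], inA)) ([], false)
  PySem.Str.join "\r\n" st.1

-- ===== PORT B =====
-- rewrite one section: only a group headed by an m=audio line is mapped
def pvTrGroup (g : List String) : List String :=
  match g with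
  | [] => []
  | h :: _ =>
    if PySem.Str.startswith h "m=audio" then
      g.map (fun l => if l == "a=recvonly" then "a=sendrecv" else l)
    else g

def enable_audio_sendrecv_py_alt (sdp : String) : String :=
  let lines := (PySem.Str.split? sdp "\r\n").getD []
  let st := lines.foldl (fun (st : List (List String) × List String) line =>
    if PySem.Str.startswith line "m=" then (st.1 ++ [st.2], [line])
    else (st.1, st.2 ++ [line])) ([], [])
  let groups := st.1 ++ [st.2]
  let out := groups.foldl (fun out g => out ++ pvTrGroup g) []
  PySem.Str.join "\r\n" out

-- ===== PRECONDITION & SPEC =====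
def Spec_enable_audio_sendrecv_py (sdp : String) (out : String) : Prop := out = enable_audio_sendrecv_py_alt sdp
instance (sdp : String) (out : String) : Decidable (Spec_enable_audio_sendrecv_py sdp out) := by unfold Spec_enable_audio_sendrecv_py; infer_instance

-- ===== CLAIM (what is proved, stated in full; the proofs are below) =====
def Claim_equal_enable_audio_sendrecv_py : Prop := ∀ (sdp : String), Dom_enable_audio_sendrecv_py sdp → Spec_enable_audio_sendrecv_py sdp (enable_audio_sendrecv_py sdp)

-- ===== LEMMAS AND PROOFS =====

-- the flag after seeing line l with previous flag b, and the emitted line under the new flag b'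
def pvFlag (l : String) (b : Bool) : Bool :=
  if PySem.Str.startswith l "m=audio" then true
  else if PySem.Str.startswith l "m=" then false else b

def pvLine (l : String) (b' : Bool) : String :=
  if b' && l == "a=recvonly" then "a=sendrecv" else l

-- A's output lines as a direct recursion
def pvOutA : List String → Bool → List String
  | [], _ => []
  | l :: ls, b => pvLine l (pvFlag l b) :: pvOutA ls (pvFlag l b)

def pvStepA (st : List String × Bool) (line : String) : List String × Bool :=
  (st.1 ++ [pvLine line (pvFlag line st.2)], pvFlag line st.2)

lemma pvStepA_eq : (fun (st : List String × Bool) line =>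
    let inA := if PySem.Str.startswith line "m=audio" then true
               else if PySem.Str.startswith line "m=" then false
               else st.2
    if inA && line == "a=recvonly" then (st.1 ++ ["a=sendrecv"], inA)
    else (st.1 ++ [line], inA)) = pvStepA := by
  funext st line
  simp only [pvStepA, pvLine, pvFlag]
  split_ifs <;> simp_all

lemma pvFoldA_eq (ls : List String) : ∀ (st : List String × Bool),
    (ls.foldl pvStepA st).1 = st.1 ++ pvOutA ls st.2 := by
  induction ls with
  | nil => intro st; simp [pvOutA]
  | cons l ls ih =>
    intro st
    rw [List.foldl_cons, ih]
    simp [pvStepA, pvOutA]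

def pvStepB (st : List (List String) × List String) (line : String) : List (List String) × List String :=
  if PySem.Str.startswith line "m=" then (st.1 ++ [st.2], [line])
  else (st.1, st.2 ++ [line])

def pvFlatTr (gs : List (List String)) : List String := (gs.map pvTrGroup).flatten

lemma pvFlatTr_append (gs hs : List (List String)) :
    pvFlatTr (gs ++ hs) = pvFlatTr gs ++ pvFlatTr hs := by
  simp [pvFlatTr]

lemma pvFoldTr_eq (gs : List (List String)) : ∀ acc,
    gs.foldl (fun out g => out ++ pvTrGroup g) acc = acc ++ pvFlatTr gs := by
  induction gs with
  | nil => intro acc; simp [pvFlatTr]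
  | cons g gs ih => intro acc; simp [List.foldl_cons, ih, pvFlatTr]

lemma pv_startswith_mono (l : String) (h : PySem.Str.startswith l "m=audio" = true) :
    PySem.Str.startswith l "m=" = true := by
  simp only [PySem.Str.startswith_eq, PySem.Chars.startswith_iff] at h ⊢
  exact List.IsPrefix.trans (by decide) h

lemma pv_m_ne_recvonly (l : String) (h : PySem.Str.startswith l "m=" = true) :
    (l == "a=recvonly") = false := by
  apply beq_eq_false_iff_ne.mpr
  intro he
  subst he
  exact absurd h (by decide)

lemma pv_not_of_false {b : Bool} (h : b = false) : ¬ (b = true) := by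
  intro h'; rw [h] at h'; exact Bool.false_ne_true h'

lemma pvLine_of_ne (l : String) (b : Bool) (hr : (l == "a=recvonly") = false) :
    pvLine l b = l := by
  unfold pvLine
  rw [hr, Bool.and_false]
  exact if_neg (pv_not_of_false rfl)

lemma pvTr_single (l : String) (hr : (l == "a=recvonly") = false) :
    pvTrGroup [l] = [l] := by
  simp only [pvTrGroup, List.map_cons, List.map_nil]
  rw [if_neg (pv_not_of_false hr)]
  split <;> rfl

lemma pvTr_snoc (h l : String) (t : List String) :
    pvTrGroup ((h :: t) ++ [l]) = pvTrGroup (h :: t) ++ [pvLine l (PySem.Str.startswith h "m=audio")] := by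
  simp only [pvTrGroup, List.cons_append]
  by_cases hh : PySem.Str.startswith h "m=audio" = true
  · rw [if_pos hh, if_pos hh]
    unfold pvLine
    rw [hh, Bool.true_and]
    simp
  · rw [if_neg hh, if_neg hh]
    unfold pvLine
    rw [Bool.not_eq_true] at hh
    rw [hh, Bool.false_and, if_neg (pv_not_of_false rfl)]
    simp only [List.cons_append]

-- the invariant: the flag b equals "the current group is headed by an m=audio line"
def pvInv (b : Bool) (cur : List String) : Prop :=
  match cur with
  | [] => b = false
  | h :: _ => b = PySem.Str.startswith h "m=audio"

lemma pvFlag_of_m (l : String) (b : Bool) (hm : PySem.Str.startswith l "m=" = true) :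
    pvFlag l b = PySem.Str.startswith l "m=audio" := by
  unfold pvFlag
  by_cases ha : PySem.Str.startswith l "m=audio" = true
  · rw [if_pos ha, ha]
  · rw [if_neg ha, if_pos hm, Bool.not_eq_true] at *
    rw [ha]

lemma pvFlag_of_not_m (l : String) (b : Bool) (hm : PySem.Str.startswith l "m=" = false) :
    pvFlag l b = b := by
  have ha : PySem.Str.startswith l "m=audio" = false := by
    by_cases h' : PySem.Str.startswith l "m=audio" = true
    · exact absurd (pv_startswith_mono l h') (pv_not_of_false hm)
    · rwa [Bool.not_eq_true] at h'
  unfold pvFlag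
  rw [if_neg (pv_not_of_false ha), if_neg (pv_not_of_false hm)]

lemma pvMain (ls : List String) : ∀ (b : Bool) (cur : List String) (gs : List (List String)),
    pvInv b cur →
    pvFlatTr ((ls.foldl pvStepB (gs, cur)).1 ++ [(ls.foldl pvStepB (gs, cur)).2]) =
      pvFlatTr (gs ++ [cur]) ++ pvOutA ls b := by
  induction ls with
  | nil => intro b cur gs _; simp [pvOutA]
  | cons l ls ih =>
    intro b cur gs hinv
    rw [List.foldl_cons]
    simp only [pvOutA]
    by_cases hm : PySem.Str.startswith l "m=" = true
    · have hstep : pvStepB (gs, cur) l = (gs ++ [cur], [l]) := by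
        unfold pvStepB; rw [if_pos hm]
      have hr := pv_m_ne_recvonly l hm
      rw [hstep, pvFlag_of_m l b hm, pvLine_of_ne l _ hr,
          ih (PySem.Str.startswith l "m=audio") [l] (gs ++ [cur]) (by rfl)]
      simp only [pvFlatTr_append]
      rw [show pvFlatTr [[l]] = [l] by simpa [pvFlatTr] using pvTr_single l hr]
      simp
    · rw [Bool.not_eq_true] at hm
      have hstep : pvStepB (gs, cur) l = (gs, cur ++ [l]) := by
        unfold pvStepB; rw [if_neg (pv_not_of_false hm)]
      rw [hstep, pvFlag_of_not_m l b hm]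
      cases cur with
      | nil =>
        unfold pvInv at hinv
        subst hinv
        have ha : PySem.Str.startswith l "m=audio" = false := by
          by_cases h' : PySem.Str.startswith l "m=audio" = true
          · exact absurd (pv_startswith_mono l h') (pv_not_of_false hm)
          · rwa [Bool.not_eq_true] at h'
        simp only [List.nil_append]
        rw [ih false [l] gs ha.symm]
        simp only [pvFlatTr_append]
        rw [show pvFlatTr [[l]] = [l] by
              simp only [pvFlatTr, List.map_cons, List.map_nil, List.flatten]
              simp only [pvTrGroup]
              rw [if_neg (pv_not_of_false ha)]
              simp,
            show pvFlatTr [([] : List String)] = [] by simp [pvFlatTr, pvTrGroup],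
            show pvLine l false = l by unfold pvLine; rw [Bool.false_and]; exact if_neg (pv_not_of_false rfl)]
        simp
      | cons h t =>
        unfold pvInv at hinv
        subst hinv
        rw [ih (PySem.Str.startswith h "m=audio") ((h :: t) ++ [l]) gs (by rfl)]
        simp only [pvFlatTr_append]
        rw [show pvFlatTr [(h :: t) ++ [l]] = pvFlatTr [h :: t] ++ [pvLine l (PySem.Str.startswith h "m=audio")] by
              simpa [pvFlatTr] using pvTr_snoc h l t]
        simp

-- ===== VERDICT (by name: the statement is the Claim_ definition above) =====
theorem enable_audio_sendrecv_py_spec : Claim_equal_enable_audio_sendrecv_py := by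
  intro sdp _
  unfold Spec_enable_audio_sendrecv_py enable_audio_sendrecv_py enable_audio_sendrecv_py_alt
  simp only
  congr 1
  rw [pvStepA_eq,
      show (fun (st : List (List String) × List String) line =>
        if PySem.Str.startswith line "m=" then (st.1 ++ [st.2], [line])
        else (st.1, st.2 ++ [line])) = pvStepB from rfl,
      pvFoldTr_eq, pvFoldA_eq,
      pvMain ((PySem.Str.split? sdp "\r\n").getD []) false [] [] rfl,
      show pvFlatTr ([] ++ [[]]) = [] by simp [pvFlatTr, pvTrGroup]]
  simp
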